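-- pv_equiv track=rewrite | github.com/yunuserme/HamingCode-Wizard | src/hamming_core.py | sendrom_hesapla
-- ===== SOURCE A (Python) =====
-- def sendrom_hesapla(kodlanmis):
--     uzunluk = len(kodlanmis)
--
--     # Kaç tane parity bit var acaba?
--     r = 0
--     while 2**r < uzunluk:
--         r += 1
--
--     # Önce genel parity'i kontrol edelim
--     genel_parity_check = 0
--     for bit in kodlanmis:
--         genel_parity_check ^= bit
--
--     # Şimdi sendromu hesaplayalım, sendrom hata pozisyonunu verecek
--     sendrom = 0
--     for i in range(r-1):
--         parity_poz = 2**i - 1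
--         parity_check = 0
--         for j in range(uzunluk-1):
--             if (j+1) & (2**i):
--                 parity_check ^= kodlanmis[j]
--         if parity_check != 0:
--             sendrom += 2**i
--
--     return sendrom, genel_parity_check != 0
-- ===== SOURCE B (Python) =====
-- def sendrom_hesapla(kodlanmis):
--     n = len(kodlanmis)
--
--     # smallest r with 2**r >= n
--     r = 0
--     while 2 ** r < n:
--         r += 1
--
--     # single pass: overall parity and one accumulator per syndrome bit plane
--     genel = 0
--     accs = [0] * (r - 1 if r > 0 else 0)
--     for j, x in enumerate(kodlanmis):
--         genel ^= x
--         if j < n - 1: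
--             accs = [a ^ x if (j + 1) & (2 ** i) else a for i, a in enumerate(accs)]
--
--     sendrom = sum(2 ** i for i, a in enumerate(accs) if a != 0)
--     return sendrom, genel != 0
-- ===== Notes on version B (the rewrite author's own statement) =====
-- stated objective: alternative
-- what changed: A computes each syndrome bit with its own full scan of the codeword (plane-major nested loops); B makes one element-major pass that xors every code bit into the overall parity and into each plane accumulator whose index bit of j+1 is set, then assembles the syndrome from the accumulators.
import Mathlib
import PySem

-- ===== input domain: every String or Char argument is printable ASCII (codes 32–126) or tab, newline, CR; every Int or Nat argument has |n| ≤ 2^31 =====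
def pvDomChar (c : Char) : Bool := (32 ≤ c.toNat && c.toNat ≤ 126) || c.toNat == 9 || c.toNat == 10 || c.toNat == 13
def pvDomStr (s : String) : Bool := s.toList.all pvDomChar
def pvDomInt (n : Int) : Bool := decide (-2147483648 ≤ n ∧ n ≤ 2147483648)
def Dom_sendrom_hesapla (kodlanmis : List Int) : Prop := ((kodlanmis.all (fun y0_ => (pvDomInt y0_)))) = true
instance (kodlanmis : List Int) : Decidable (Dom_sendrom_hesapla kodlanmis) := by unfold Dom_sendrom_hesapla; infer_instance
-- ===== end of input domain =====

-- B replaces A's plane-major syndrome loops (one full scan per parity bit) by a single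
-- element-major pass that xors each code bit into every accumulator whose plane covers it
-- (objective: alternative single-pass structure, same exact results).

-- ===== PORT A =====
-- the 'while 2**r < uzunluk: r += 1' loop of both Pythons; the fuel only makes the
-- recursion structural and never runs out for fuel = uzunluk.toNat (2^m > m ≥ uzunluk there)
def pvRWhileF : Nat → Int → Nat → Nat
  | 0, _, r => r
  | fuel + 1, uzunluk, r => if (2 : Int) ^ r < uzunluk then pvRWhileF fuel uzunluk (r + 1) else r

def sendrom_hesapla (kodlanmis : List Int) : Int × Bool :=
  let uzunluk : Int := PySem.List.len kodlanmis
  let r : Nat := pvRWhileF uzunluk.toNat uzunluk 0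
  let genel_parity_check : Int := kodlanmis.foldl (fun g bit => PySem.Int.bxor g bit) 0
  let sendrom : Int :=
    (PySem.List.pyRange 0 ((r : Int) - 1) 1).foldl (fun send i =>
      let parity_check : Int :=
        (PySem.List.pyRange 0 (uzunluk - 1) 1).foldl (fun pc j =>
          if PySem.Int.band (j + 1) (2 ^ i.toNat) ≠ 0 then
            PySem.Int.bxor pc (PySem.List.pyGetD kodlanmis j 0)
          else pc) 0
      if parity_check ≠ 0 then send + 2 ^ i.toNat else send) 0
  (sendrom, genel_parity_check != 0)

-- ===== PORT B =====
-- one step of B's single pass: xor into the overall parity, and (for every position but the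
-- last) xor the bit into each plane accumulator whose index bit of j+1 is set
def pvStepB (n : Int) (st : Int × List Int) (jx : Int × Int) : Int × List Int :=
  (PySem.Int.bxor st.1 jx.2,
   if jx.1 < n - 1 then
     (PySem.List.enumerate st.2).map (fun ia =>
       if PySem.Int.band (jx.1 + 1) (2 ^ ia.1.toNat) ≠ 0 then PySem.Int.bxor ia.2 jx.2 else ia.2)
   else st.2)

def sendrom_hesapla_alt (kodlanmis : List Int) : Int × Bool :=
  let n : Int := PySem.List.len kodlanmis
  let r : Nat := pvRWhileF n.toNat n 0
  let st := (PySem.List.enumerate kodlanmis).foldl (pvStepB n) (0, List.replicate (r - 1) 0)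
  let sendrom : Int :=
    (PySem.List.enumerate st.2).foldl (fun s ia => if ia.2 ≠ 0 then s + 2 ^ ia.1.toNat else s) 0
  (sendrom, st.1 != 0)

-- ===== PRECONDITION & SPEC =====
def Spec_sendrom_hesapla (kodlanmis : List Int) (out : Int × Bool) : Prop := out = sendrom_hesapla_alt kodlanmis
instance (kodlanmis : List Int) (out : Int × Bool) : Decidable (Spec_sendrom_hesapla kodlanmis out) := by unfold Spec_sendrom_hesapla; infer_instance

-- ===== CLAIM (what is proved, stated in full; the proofs are below) =====
def Claim_equal_sendrom_hesapla : Prop := ∀ (kodlanmis : List Int), Dom_sendrom_hesapla kodlanmis → Spec_sendrom_hesapla kodlanmis (sendrom_hesapla kodlanmis)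

-- ===== LEMMAS AND PROOFS =====

-- B's single pass, characterised: first component accumulates the overall xor, and the k-th
-- accumulator receives exactly the conditional xors of A's plane-k inner loop.
lemma pvLoopB (n : Int) (xs : List Int) : ∀ (s g : Int) (accs : List Int),
    ((PySem.List.enumerate xs s).foldl (pvStepB n) (g, accs)).1
      = xs.foldl (fun g bit => PySem.Int.bxor g bit) g
  ∧ ((PySem.List.enumerate xs s).foldl (pvStepB n) (g, accs)).2.length = accs.length
  ∧ ∀ (k : Nat),
      ((PySem.List.enumerate xs s).foldl (pvStepB n) (g, accs)).2[k]?
        = (accs[k]?).map (fun a => (PySem.List.enumerate xs s).foldl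
            (fun p jx => if jx.1 < n - 1 ∧ PySem.Int.band (jx.1 + 1) (2 ^ k) ≠ 0
                         then PySem.Int.bxor p jx.2 else p) a) := by
  induction xs with
  | nil =>
      intro s g accs
      refine ⟨rfl, rfl, ?_⟩
      intro k
      simp only [PySem.List.enumerate_nil, List.foldl_nil]
      cases accs[k]? <;> rfl
  | cons x xs ih =>
      intro s g accs
      rw [PySem.List.enumerate_cons, List.foldl_cons]
      have hstep : pvStepB n (g, accs) (s, x)
          = (PySem.Int.bxor g x,
             if s < n - 1 then
               (PySem.List.enumerate accs).map (fun ia =>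
                 if PySem.Int.band (s + 1) (2 ^ ia.1.toNat) ≠ 0 then PySem.Int.bxor ia.2 x else ia.2)
             else accs) := rfl
      rw [hstep]
      obtain ⟨h1, h2, h3⟩ := ih (s + 1) (PySem.Int.bxor g x)
        (if s < n - 1 then
           (PySem.List.enumerate accs).map (fun ia =>
             if PySem.Int.band (s + 1) (2 ^ ia.1.toNat) ≠ 0 then PySem.Int.bxor ia.2 x else ia.2)
         else accs)
      refine ⟨by simpa using h1, ?_, ?_⟩
      · rw [h2]
        split <;> simp [PySem.List.length_enumerate]
      · intro k
        rw [h3 k]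
        simp only [List.foldl_cons]
        by_cases hs : s < n - 1
        · simp only [hs, if_true]
          rw [List.getElem?_map, PySem.List.getElem?_enumerate]
          cases accs[k]? <;> simp
        · simp only [hs, if_false]
          cases accs[k]? <;> simp

-- range(r-1) over Int, as a mapped Nat range (both sides empty when r = 0)
lemma pvRangeCast (r : Nat) :
    PySem.List.pyRange 0 ((r : Int) - 1) 1 = (List.range (r - 1)).map (fun k : Nat => (k : Int)) := by
  cases r with
  | zero => rw [PySem.List.pyRange_one_eq_nil (by omega)]; simp
  | succ m =>
      have h : ((m + 1 : Nat) : Int) - 1 = ((m : Nat) : Int) := by push_cast; ring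
      rw [h, PySem.List.pyRange_zero_natCast]
      rfl

-- B's per-plane conditional xor over the enumerated list equals A's plane-k inner loop
lemma pvPlane (xs : List Int) (k : Nat) (hx : xs ≠ []) :
    (PySem.List.enumerate xs).foldl
      (fun p jx => if jx.1 < (PySem.List.len xs) - 1 ∧ PySem.Int.band (jx.1 + 1) (2 ^ k) ≠ 0
                   then PySem.Int.bxor p jx.2 else p) 0
    = (PySem.List.pyRange 0 ((PySem.List.len xs) - 1) 1).foldl
        (fun pc j => if PySem.Int.band (j + 1) (2 ^ k) ≠ 0
                     then PySem.Int.bxor pc (PySem.List.pyGetD xs j 0) else pc) 0 := by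
  have hn : 1 ≤ PySem.List.len xs := by
    simp only [PySem.List.len_eq]
    cases xs with
    | nil => exact absurd rfl hx
    | cons a l => simp
  rw [PySem.List.enumerate_eq_map_pyRange xs 0, List.foldl_map]
  rw [PySem.List.pyRange_one_append 0 (PySem.List.len xs - 1) (PySem.List.len xs) (by omega) (by omega),
      List.foldl_append]
  rw [PySem.List.pyRange_one_cons (show PySem.List.len xs - 1 < PySem.List.len xs by omega)]
  rw [show PySem.List.len xs - 1 + 1 = PySem.List.len xs by ring,
      PySem.List.pyRange_one_eq_nil (le_refl _)]
  simp only [List.foldl_cons, List.foldl_nil, lt_irrefl, false_and, if_false]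
  apply PySem.List.foldl_congr_mem
  intro acc j hj
  have hjlt : j < PySem.List.len xs - 1 := (PySem.List.mem_pyRange_one.mp hj).2
  simp only [PySem.List.len_eq] at hjlt ⊢
  by_cases hb : PySem.Int.band (j + 1) (2 ^ k) = 0 <;> simp [hjlt, hb]

-- ===== VERDICT (by name: the statement is the Claim_ definition above) =====
theorem sendrom_hesapla_spec : Claim_equal_sendrom_hesapla := by
  intro kodlanmis _
  unfold Spec_sendrom_hesapla
  by_cases hx : kodlanmis = []
  · subst hx; decide
  · simp only [sendrom_hesapla, sendrom_hesapla_alt]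
    obtain ⟨h1, h2, h3⟩ := pvLoopB (PySem.List.len kodlanmis) kodlanmis 0 0
      (List.replicate (pvRWhileF (PySem.List.len kodlanmis).toNat (PySem.List.len kodlanmis) 0 - 1) 0)
    set n : Int := PySem.List.len kodlanmis with hn
    set r : Nat := pvRWhileF n.toNat n 0 with hr
    set st := (PySem.List.enumerate kodlanmis).foldl (pvStepB n) (0, List.replicate (r - 1) 0) with hst
    have hlen2 : st.2.length = r - 1 := by rw [h2, List.length_replicate]
    have hlenInt : PySem.List.len st.2 = ((r - 1 : Nat) : Int) := by
      simp [PySem.List.len_eq, hlen2]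
    refine Prod.ext ?_ ?_ <;> dsimp only
    · -- the syndromes agree
      rw [pvRangeCast r]
      rw [PySem.List.enumerate_eq_map_pyRange st.2 0, hlenInt, PySem.List.pyRange_zero_natCast]
      simp only [List.foldl_map]
      apply PySem.List.foldl_congr_mem
      intro acc k hk
      have hklt : k < r - 1 := List.mem_range.mp hk
      have hget : st.2[k]? = some ((PySem.List.enumerate kodlanmis).foldl
          (fun p jx => if jx.1 < n - 1 ∧ PySem.Int.band (jx.1 + 1) (2 ^ k) ≠ 0
                       then PySem.Int.bxor p jx.2 else p) 0) := by
        rw [h3 k, List.getElem?_replicate]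
        simp [hklt]
      have hgetD : PySem.List.pyGetD st.2 ((k : Nat) : Int) 0
          = (PySem.List.enumerate kodlanmis).foldl
              (fun p jx => if jx.1 < n - 1 ∧ PySem.Int.band (jx.1 + 1) (2 ^ k) ≠ 0
                           then PySem.Int.bxor p jx.2 else p) 0 := by
        rw [PySem.List.pyGetD_natCast, List.getD_eq_getElem?_getD, hget]; rfl
      have hp := pvPlane kodlanmis k hx
      rw [← hn] at hp
      simp only [hgetD, hp, Int.toNat_natCast]
      rfl
    · -- the overall parities agree
      rw [h1]
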